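-- pv_equiv track=rewrite | github.com/ayoubzulfiqar/Leetcode-Medium | SparseMatrixMultiplication/sparse_matrix_multiplication.py | sparse_matrix_multiply
-- ===== SOURCE A (Python) =====
-- def sparse_matrix_multiply(matrix_a_data, matrix_a_dims, matrix_b_data, matrix_b_dims):
--     rows_a, cols_a = matrix_a_dims
--     rows_b, cols_b = matrix_b_dims
--
--     if cols_a != rows_b:
--         raise ValueError("Matrix dimensions are not compatible for multiplication.")
--
--     A_dict = {}
--     for r, c, val in matrix_a_data:
--         if val != 0:
--             A_dict[(r, c)] = val
--
--     B_by_row = {}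
--     for r, c, val in matrix_b_data:
--         if val != 0:
--             if r not in B_by_row:
--                 B_by_row[r] = {}
--             B_by_row[r][c] = val
--
--     C_dict = {}
--
--     for (rA, cA), valA in A_dict.items():
--         if cA in B_by_row:
--             for cB, valB in B_by_row[cA].items():
--                 C_dict[(rA, cB)] = C_dict.get((rA, cB), 0) + valA * valB
--
--     result_list = []
--     for (r, c), val in C_dict.items():
--         if val != 0:
--             result_list.append((r, c, val))
--
--     result_list.sort(key=lambda x: (x[0], x[1]))
--
--     return result_list
-- ===== SOURCE B (Python) =====
-- def sparse_matrix_multiply(matrix_a_data, matrix_a_dims, matrix_b_data, matrix_b_dims):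
--     rows_a, cols_a = matrix_a_dims
--     rows_b, cols_b = matrix_b_dims
--
--     if cols_a != rows_b:
--         raise ValueError("Matrix dimensions are not compatible for multiplication.")
--
--     # last-nonzero-wins dedup of both coordinate lists (flat dicts)
--     A_last = {}
--     for r, c, val in matrix_a_data:
--         if val != 0:
--             A_last[(r, c)] = val
--
--     B_last = {}
--     for r, c, val in matrix_b_data:
--         if val != 0:
--             B_last[(r, c)] = val
--
--     # row index of A and column lists of B, built once
--     A_rows = {}
--     for (r, k), va in A_last.items():
--         A_rows.setdefault(r, []).append((k, va))
--
--     B_cols = {}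
--     for (k, c), _vb in B_last.items():
--         B_cols.setdefault(k, []).append(c)
--
--     # candidate output cells, in sorted order; then one dot product per cell
--     cells = sorted({(r, c) for (r, k) in A_last for c in B_cols.get(k, [])})
--
--     result = []
--     for r, c in cells:
--         v = sum(va * B_last.get((k, c), 0) for k, va in A_rows.get(r, []))
--         if v != 0:
--             result.append((r, c, v))
--     return result
-- ===== Notes on version B (the rewrite author's own statement) =====
-- stated objective: alternative
-- what changed: A scatter-accumulates products into a C_dict via a nested row-dict of B and sorts the collected nonzero entries at the end; B instead builds flat last-wins dicts plus a row index of A and a column index of B, enumerates the candidate output cells, sorts them first, and computes each cell's value directly as one dot product, emitting results already in order.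
import Mathlib
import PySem

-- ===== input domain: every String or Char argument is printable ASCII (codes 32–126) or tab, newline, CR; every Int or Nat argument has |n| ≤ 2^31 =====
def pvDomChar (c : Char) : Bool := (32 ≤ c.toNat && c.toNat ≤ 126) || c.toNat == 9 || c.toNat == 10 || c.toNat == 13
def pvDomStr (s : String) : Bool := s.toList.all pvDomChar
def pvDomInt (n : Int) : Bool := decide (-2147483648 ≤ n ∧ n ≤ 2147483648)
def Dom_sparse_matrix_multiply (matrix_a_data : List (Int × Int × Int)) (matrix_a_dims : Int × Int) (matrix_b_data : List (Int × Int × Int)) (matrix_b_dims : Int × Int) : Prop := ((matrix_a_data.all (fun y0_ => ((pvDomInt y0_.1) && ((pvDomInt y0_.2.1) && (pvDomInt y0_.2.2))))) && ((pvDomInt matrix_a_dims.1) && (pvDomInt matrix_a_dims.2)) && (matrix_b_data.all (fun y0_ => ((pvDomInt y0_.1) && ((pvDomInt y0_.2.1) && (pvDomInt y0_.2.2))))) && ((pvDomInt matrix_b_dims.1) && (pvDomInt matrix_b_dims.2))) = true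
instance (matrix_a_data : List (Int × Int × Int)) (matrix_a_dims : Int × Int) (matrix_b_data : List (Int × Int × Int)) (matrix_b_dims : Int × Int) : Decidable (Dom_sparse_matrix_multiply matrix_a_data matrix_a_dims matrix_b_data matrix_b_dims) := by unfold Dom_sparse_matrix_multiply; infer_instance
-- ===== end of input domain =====

-- B replaces A's scatter-accumulate into C_dict (nested B-row dict, then sort) by building row/column
-- indexes once and computing each output cell's dot product directly, in sorted cell order ("alternative").

-- ===== PORT A =====
-- shared dedup helper: both Pythons build the SAME flat last-nonzero-wins dict for matrix A
-- (and B's Python reuses this exact loop for matrix B)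
def pvDedupNZ (l : List (Int × Int × Int)) : PySem.Dict (Int × Int) Int :=
  l.foldl (fun d t => if t.2.2 ≠ 0 then d.insert (t.1, t.2.1) t.2.2 else d) PySem.Dict.empty

-- A's nested dict: row -> (col -> val), last-nonzero-wins
def pvBByRow (l : List (Int × Int × Int)) : PySem.Dict Int (PySem.Dict Int Int) :=
  l.foldl (fun d t =>
    if t.2.2 ≠ 0 then
      let d' := if d.contains t.1 then d else d.insert t.1 PySem.Dict.empty
      d'.insert t.1 ((d'.getD t.1 PySem.Dict.empty).insert t.2.1 t.2.2)
    else d) PySem.Dict.empty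

def sparse_matrix_multiply (matrix_a_data : List (Int × Int × Int)) (matrix_a_dims : Int × Int) (matrix_b_data : List (Int × Int × Int)) (matrix_b_dims : Int × Int) : List (Int × Int × Int) :=
  if matrix_a_dims.2 ≠ matrix_b_dims.1 then []  -- Python raises ValueError here; outside Pre_
  else
    let A_dict := pvDedupNZ matrix_a_data
    let B_by_row := pvBByRow matrix_b_data
    let C_dict : PySem.Dict (Int × Int) Int := A_dict.items.foldl (fun C p =>
      if B_by_row.contains p.1.2 then
        (B_by_row.getD p.1.2 PySem.Dict.empty).items.foldl
          (fun C q => C.insert (p.1.1, q.1) (C.getD (p.1.1, q.1) 0 + p.2 * q.2)) C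
      else C) PySem.Dict.empty
    let result_list := C_dict.items.foldl
      (fun acc pr => if pr.2 ≠ 0 then acc ++ [(pr.1.1, pr.1.2, pr.2)] else acc) []
    PySem.List.sorted2 result_list (fun x => x.1) (fun x => x.2.1)

-- ===== PORT B =====
def sparse_matrix_multiply_alt (matrix_a_data : List (Int × Int × Int)) (matrix_a_dims : Int × Int) (matrix_b_data : List (Int × Int × Int)) (matrix_b_dims : Int × Int) : List (Int × Int × Int) :=
  if matrix_a_dims.2 ≠ matrix_b_dims.1 then []  -- B raises ValueError here too; outside Pre_
  else
    let A_last := pvDedupNZ matrix_a_data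
    let B_last := pvDedupNZ matrix_b_data
    let A_rows : PySem.Dict Int (List (Int × Int)) :=
      A_last.items.foldl (fun d p => d.modify p.1.1 [] (fun xs => xs ++ [(p.1.2, p.2)])) PySem.Dict.empty
    let B_cols : PySem.Dict Int (List Int) :=
      B_last.items.foldl (fun d p => d.modify p.1.1 [] (fun xs => xs ++ [p.1.2])) PySem.Dict.empty
    let cells := PySem.List.sorted2
      (PySem.Set.ofList (A_last.keys.flatMap (fun rk => (B_cols.getD rk.2 []).map (fun c => (rk.1, c)))))
      (fun x => x.1) (fun x => x.2)
    cells.foldl (fun res rc =>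
      let v := ((A_rows.getD rc.1 []).map (fun kv => kv.2 * B_last.getD (kv.1, rc.2) 0)).sum
      if v ≠ 0 then res ++ [(rc.1, rc.2, v)] else res) []

-- ===== PRECONDITION & SPEC =====
-- Pre_ excludes exactly the incompatible-dimension inputs (cols_a ≠ rows_b), on which the Python A raises ValueError.
def Pre_sparse_matrix_multiply (matrix_a_data : List (Int × Int × Int)) (matrix_a_dims : Int × Int) (matrix_b_data : List (Int × Int × Int)) (matrix_b_dims : Int × Int) : Prop :=
  matrix_a_dims.2 = matrix_b_dims.1
instance (matrix_a_data : List (Int × Int × Int)) (matrix_a_dims : Int × Int) (matrix_b_data : List (Int × Int × Int)) (matrix_b_dims : Int × Int) : Decidable (Pre_sparse_matrix_multiply matrix_a_data matrix_a_dims matrix_b_data matrix_b_dims) := by unfold Pre_sparse_matrix_multiply; infer_instance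

def pvWitness_sparse_matrix_multiply : (List (Int × Int × Int)) × (Int × Int) × (List (Int × Int × Int)) × (Int × Int) :=
  ([(0, 0, 2), (0, 1, 1)], (1, 2), [(0, 0, 3), (1, 0, 4)], (2, 1))

def Spec_sparse_matrix_multiply (matrix_a_data : List (Int × Int × Int)) (matrix_a_dims : Int × Int) (matrix_b_data : List (Int × Int × Int)) (matrix_b_dims : Int × Int) (out : List (Int × Int × Int)) : Prop := out = sparse_matrix_multiply_alt matrix_a_data matrix_a_dims matrix_b_data matrix_b_dims
instance (matrix_a_data : List (Int × Int × Int)) (matrix_a_dims : Int × Int) (matrix_b_data : List (Int × Int × Int)) (matrix_b_dims : Int × Int) (out : List (Int × Int × Int)) : Decidable (Spec_sparse_matrix_multiply matrix_a_data matrix_a_dims matrix_b_data matrix_b_dims out) := by unfold Spec_sparse_matrix_multiply; infer_instance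

-- ===== CLAIM (what is proved, stated in full; the proofs are below) =====
def Claim_equal_sparse_matrix_multiply : Prop := ∀ (matrix_a_data : List (Int × Int × Int)) (matrix_a_dims : Int × Int) (matrix_b_data : List (Int × Int × Int)) (matrix_b_dims : Int × Int), Dom_sparse_matrix_multiply matrix_a_data matrix_a_dims matrix_b_data matrix_b_dims → Pre_sparse_matrix_multiply matrix_a_data matrix_a_dims matrix_b_data matrix_b_dims → Spec_sparse_matrix_multiply matrix_a_data matrix_a_dims matrix_b_data matrix_b_dims (sparse_matrix_multiply matrix_a_data matrix_a_dims matrix_b_data matrix_b_dims)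

-- ===== LEMMAS AND PROOFS =====

-- proof-side abbreviations: the flat contribution list, per-cell sums, the key set
def pvContrib (a b : List (Int × Int × Int)) : List (Int × Int × Int) :=
  (pvDedupNZ a).items.flatMap (fun p =>
    ((pvBByRow b).getD p.1.2 PySem.Dict.empty).items.map (fun s => (p.1.1, s.1, p.2 * s.2)))

def pvS (a b : List (Int × Int × Int)) (q : Int × Int) : Int :=
  (((pvContrib a b).filter (fun t => (t.1, t.2.1) == q)).map (fun t => t.2.2)).sum

def pvK (a b : List (Int × Int × Int)) : List (Int × Int) :=
  PySem.Set.ofList ((pvContrib a b).map (fun t => (t.1, t.2.1)))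

def pvX (a b : List (Int × Int × Int)) : List (Int × Int × Int) :=
  ((pvK a b).filter (fun k => decide (pvS a b k ≠ 0))).map (fun k => (k.1, k.2, pvS a b k))

theorem pv_nodup_aux (l : List (Int × Int × Int)) :
    ∀ d : PySem.Dict (Int × Int) Int, d.keys.Nodup →
      (l.foldl (fun d t => if t.2.2 ≠ 0 then d.insert (t.1, t.2.1) t.2.2 else d) d).keys.Nodup := by
  induction l with
  | nil => intro d hd; simpa using hd
  | cons t l ih =>
    intro d hd
    simp only [List.foldl_cons]
    by_cases h : t.2.2 = 0
    · simp only [h, ne_eq, not_true_eq_false]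
      exact ih d hd
    · rw [if_pos h]
      exact ih _ (PySem.Dict.nodup_keys_insert d _ _ hd)

theorem pv_nodup_keys_dedup (l : List (Int × Int × Int)) : (pvDedupNZ l).keys.Nodup := by
  unfold pvDedupNZ
  exact pv_nodup_aux l PySem.Dict.empty (by simp [PySem.Dict.keys_empty])

theorem pv_getD_sum (L : List (Int × Int × Int)) (d : PySem.Dict (Int × Int) Int) (q : Int × Int) :
    (L.foldl (fun C t => C.insert (t.1, t.2.1) (C.getD (t.1, t.2.1) 0 + t.2.2)) d).getD q 0
      = d.getD q 0 + ((L.filter (fun t => (t.1, t.2.1) == q)).map (fun t => t.2.2)).sum := by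
  induction L generalizing d with
  | nil => simp
  | cons t L ih =>
    simp only [List.foldl_cons, ih, List.filter_cons]
    by_cases h : (t.1, t.2.1) = q
    · simp [h]
      ring
    · simp [h, PySem.Dict.getD_insert, Ne.symm h]

theorem pv_sum_filter_getD (d : PySem.Dict (Int × Int) Int) (h : d.keys.Nodup) (k : Int × Int) :
    ((d.items.filter (fun q => q.1 == k)).map (fun q => q.2)).sum = d.getD k 0 := by
  obtain ⟨items⟩ := d
  induction items with
  | nil => simp [PySem.Dict.getD_eq_get?_getD, PySem.Dict.get?]
  | cons p rest ih =>
    obtain ⟨pk, pv⟩ := p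
    simp only [PySem.Dict.keys] at h ih ⊢
    simp only [List.map_cons, List.nodup_cons] at h
    simp only [List.filter_cons]
    by_cases hp : pk = k
    · have hnil : (rest.filter (fun q : (Int × Int) × Int => q.1 == k)) = [] := by
        rw [List.filter_eq_nil_iff]
        intro a ha
        simp only [beq_iff_eq]
        intro hak
        exact h.1 (by rw [hp, ← hak]; exact List.mem_map_of_mem ha)
      simp [hp, hnil, PySem.Dict.getD_eq_get?_getD, PySem.Dict.get?_mk_cons]
    · rw [if_neg (by simp [hp])]
      rw [ih h.2]
      simp [PySem.Dict.getD_eq_get?_getD, PySem.Dict.get?_mk_cons, hp]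

theorem pv_sorted2_eq_sorted {α : Type} (xs : List α) (k1 k2 : α → Int) :
    PySem.List.sorted2 xs k1 k2 = PySem.List.sorted xs (fun x => toLex (k1 x, k2 x)) := by
  have hb : (fun a b : α => decide (k1 a < k1 b) || (!decide (k1 b < k1 a) && decide (k2 a < k2 b)))
      = (fun a b : α => decide ((toLex (k1 a, k2 a)) < (toLex (k1 b, k2 b)))) := by
    funext a b
    by_cases h1 : k1 a < k1 b <;> by_cases h2 : k1 b < k1 a <;> by_cases h3 : k2 a < k2 b <;>
      simp [h1, h2, h3, Prod.Lex.lt_iff] <;> omega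
  simp only [PySem.List.sorted2, PySem.List.sorted, Bool.false_eq_true, if_false]
  rw [hb]

theorem pv_bbr_step_getD (Bb : PySem.Dict Int (PySem.Dict Int Int)) (r c v : Int) (k : Int) :
    ((let d' := if Bb.contains r then Bb else Bb.insert r PySem.Dict.empty
      d'.insert r ((d'.getD r PySem.Dict.empty).insert c v)).getD k PySem.Dict.empty)
      = if k = r then (Bb.getD r PySem.Dict.empty).insert c v else Bb.getD k PySem.Dict.empty := by
  by_cases hc : Bb.contains r
  · simp only [hc, if_true, PySem.Dict.getD_insert]
  · simp only [hc, if_false, Bool.false_eq_true, PySem.Dict.getD_insert]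
    by_cases hk : k = r
    · simp [hk, PySem.Dict.getD_of_not_contains Bb _ (by simpa using hc)]
    · simp [hk]

theorem pv_contains_corr (inner : PySem.Dict Int Int) (Bl : PySem.Dict (Int × Int) Int) (r c : Int)
    (hinv : inner.items = (Bl.items.filter (fun q => q.1.1 == r)).map (fun q => (q.1.2, q.2))) :
    inner.contains c = Bl.contains (r, c) := by
  rw [Bool.eq_iff_iff, PySem.Dict.contains_iff_mem_keys, PySem.Dict.contains_iff_mem_keys]
  simp only [PySem.Dict.keys, hinv, List.map_map, List.mem_map, List.mem_filter, Function.comp,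
    beq_iff_eq]
  constructor
  · rintro ⟨q, ⟨hq, hqr⟩, hqc⟩
    exact ⟨q, hq, by rw [← hqr, ← hqc]⟩
  · rintro ⟨q, hq, hq1⟩
    exact ⟨q, ⟨hq, by rw [hq1]⟩, by rw [hq1]⟩

theorem pv_rows_aux (l : List (Int × Int × Int)) :
    ∀ (Bb : PySem.Dict Int (PySem.Dict Int Int)) (Bl : PySem.Dict (Int × Int) Int),
      Bl.keys.Nodup →
      (∀ k, (Bb.getD k PySem.Dict.empty).items
          = (Bl.items.filter (fun q => q.1.1 == k)).map (fun q => (q.1.2, q.2))) →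
      ∀ k, ((l.foldl (fun d t =>
              if t.2.2 ≠ 0 then
                let d' := if d.contains t.1 then d else d.insert t.1 PySem.Dict.empty
                d'.insert t.1 ((d'.getD t.1 PySem.Dict.empty).insert t.2.1 t.2.2)
              else d) Bb).getD k PySem.Dict.empty).items
        = (((l.foldl (fun d t => if t.2.2 ≠ 0 then d.insert (t.1, t.2.1) t.2.2 else d) Bl).items.filter
            (fun q => q.1.1 == k)).map (fun q => (q.1.2, q.2))) := by
  induction l with
  | nil => intro Bb Bl _ hinv k; simpa using hinv k
  | cons t l ih =>
    intro Bb Bl hnd hinv k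
    simp only [List.foldl_cons]
    by_cases hz : t.2.2 = 0
    · simp only [hz, ne_eq, not_true_eq_false, if_false]
      exact ih Bb Bl hnd hinv k
    · rw [if_pos hz, if_pos hz]
      apply ih _ _ (PySem.Dict.nodup_keys_insert Bl _ _ hnd)
      intro j
      rw [pv_bbr_step_getD]
      rcases t with ⟨r, c, v⟩
      dsimp only at *
      by_cases hcont : Bl.contains (r, c)
      · rw [PySem.Dict.items_insert_of_contains _ _ hcont]
        by_cases hj : j = r
        · subst hj
          have hic : (Bb.getD j PySem.Dict.empty).contains c = true := by
            rw [pv_contains_corr _ Bl j c (hinv j)]; exact hcont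
          rw [if_pos rfl, PySem.Dict.items_insert_of_contains _ _ hic, hinv j]
          rw [List.filter_map, List.filter_congr (l := Bl.items)
            (p := (fun q : (Int × Int) × Int => q.1.1 == j) ∘
              (fun p => if (p.1 == (j, c)) = true then ((j, c), v) else p))
            (q := fun q => q.1.1 == j)
            (by
              intro p _
              by_cases hp : (p.1 == (j, c)) = true
              · have h1 : p.1.1 = j := by rw [eq_of_beq hp]
                simp [Function.comp, hp, h1]
              · simp [Function.comp, hp])]
          rw [List.map_map, List.map_map]
          apply List.map_congr_left
          intro q hq
          have hq1 : q.1.1 = j := by simpa using (List.mem_filter.mp hq).2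
          by_cases hc2 : q.1.2 = c
          · have : (q.1 == (j, c)) = true := by
              simp only [beq_iff_eq]; exact Prod.ext hq1 hc2
            simp [Function.comp, this, hc2]
          · have : ¬ (q.1 == (j, c)) = true := by
              simp only [beq_iff_eq]
              intro h'; exact hc2 (by rw [h'])
            simp [Function.comp, this, hc2]
        · rw [if_neg hj, hinv j, List.filter_map]
          rw [List.filter_congr (l := Bl.items)
            (p := (fun q : (Int × Int) × Int => q.1.1 == j) ∘
              (fun p => if (p.1 == (r, c)) = true then ((r, c), v) else p))
            (q := fun q => q.1.1 == j)
            (by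
              intro p _
              by_cases hp : (p.1 == (r, c)) = true
              · have h1 : p.1.1 = r := by rw [eq_of_beq hp]
                simp [Function.comp, hp, h1]
              · simp [Function.comp, hp])]
          rw [List.map_map]
          apply List.map_congr_left
          intro q hq
          have hq1 : q.1.1 = j := by simpa using (List.mem_filter.mp hq).2
          have : ¬ (q.1 == (r, c)) = true := by
            simp only [beq_iff_eq]
            intro h'
            exact hj (by rw [← hq1, h'])
          simp [Function.comp, this]
      · rw [PySem.Dict.items_insert_of_not_contains _ _ (by simpa using hcont)]
        rw [List.filter_append, List.map_append]
        by_cases hj : j = r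
        · subst hj
          have hic : (Bb.getD j PySem.Dict.empty).contains c = false := by
            rw [pv_contains_corr _ Bl j c (hinv j)]; simpa using hcont
          rw [if_pos rfl, PySem.Dict.items_insert_of_not_contains _ _ hic, hinv j]
          simp
        · rw [if_neg hj, hinv j]
          have : (([((r, c), v)] : List ((Int × Int) × Int)).filter (fun q => q.1.1 == j)) = [] := by
            simp [Ne.symm hj]
          rw [this]
          simp

theorem pv_rows_items (l : List (Int × Int × Int)) (k : Int) :
    ((pvBByRow l).getD k PySem.Dict.empty).items
      = ((pvDedupNZ l).items.filter (fun q => q.1.1 == k)).map (fun q => (q.1.2, q.2)) := by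
  unfold pvBByRow pvDedupNZ
  exact pv_rows_aux l PySem.Dict.empty PySem.Dict.empty (by simp [PySem.Dict.keys_empty])
    (by intro k'; rfl) k

-- a 'for x in l: if p(x): out.append(f(x))' loop is filter + map
theorem pv_foldl_append_if {α β : Type} (p : α → Prop) [DecidablePred p] (f : α → β)
    (l : List α) : ∀ acc : List β,
    l.foldl (fun acc x => if p x then acc ++ [f x] else acc) acc
      = acc ++ (l.filter (fun x => decide (p x))).map f := by
  induction l with
  | nil => intro acc; simp
  | cons x l ih =>
    intro acc
    simp only [List.foldl_cons, List.filter_cons]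
    by_cases h : p x
    · simp [h, ih]
    · simp [h, ih]

-- A's guarded nested accumulation loop is a flat fold over the contribution list
theorem pv_C_eq_fold (b : List (Int × Int × Int)) (l : List ((Int × Int) × Int)) :
    ∀ C : PySem.Dict (Int × Int) Int,
    l.foldl (fun C p =>
        if (pvBByRow b).contains p.1.2 then
          ((pvBByRow b).getD p.1.2 PySem.Dict.empty).items.foldl
            (fun C q => C.insert (p.1.1, q.1) (C.getD (p.1.1, q.1) 0 + p.2 * q.2)) C
        else C) C
      = (l.flatMap (fun p =>
          ((pvBByRow b).getD p.1.2 PySem.Dict.empty).items.map (fun s => (p.1.1, s.1, p.2 * s.2)))).foldl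
          (fun C t => C.insert (t.1, t.2.1) (C.getD (t.1, t.2.1) 0 + t.2.2)) C := by
  induction l with
  | nil => intro C; simp
  | cons p l ih =>
    intro C
    simp only [List.foldl_cons, List.flatMap_cons, List.foldl_append]
    by_cases h : (pvBByRow b).contains p.1.2
    · rw [if_pos h, ih, List.foldl_map]
    · rw [if_neg h, ih,
        PySem.Dict.getD_of_not_contains _ _ (by simpa using h)]
      rfl

-- the accumulated dict, its lookups and its keys
def pvCdict (a b : List (Int × Int × Int)) : PySem.Dict (Int × Int) Int :=
  (pvContrib a b).foldl (fun C t => C.insert (t.1, t.2.1) (C.getD (t.1, t.2.1) 0 + t.2.2))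
    PySem.Dict.empty

theorem pv_Cdict_getD (a b : List (Int × Int × Int)) (q : Int × Int) :
    (pvCdict a b).getD q 0 = pvS a b q := by
  unfold pvCdict pvS
  rw [pv_getD_sum]
  simp

theorem pv_Cdict_keys (a b : List (Int × Int × Int)) : (pvCdict a b).keys = pvK a b := by
  unfold pvCdict pvK
  rw [PySem.Dict.keys_foldl_insert_key (pvContrib a b) (fun t => (t.1, t.2.1))
    (fun C t => C.getD (t.1, t.2.1) 0 + t.2.2) PySem.Dict.empty]
  rw [PySem.Dict.keys_empty, PySem.Set.update_nil_left]

theorem pv_Cdict_nodup (a b : List (Int × Int × Int)) : (pvCdict a b).keys.Nodup := by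
  rw [pv_Cdict_keys]; exact PySem.Set.nodup_ofList _

-- A's body computes sorted(pvX) by the lex key
theorem pvA_body (a b : List (Int × Int × Int)) :
    PySem.List.sorted2
      (((pvDedupNZ a).items.foldl (fun C p =>
          if (pvBByRow b).contains p.1.2 then
            ((pvBByRow b).getD p.1.2 PySem.Dict.empty).items.foldl
              (fun C q => C.insert (p.1.1, q.1) (C.getD (p.1.1, q.1) 0 + p.2 * q.2)) C
          else C) PySem.Dict.empty).items.foldl
        (fun acc pr => if pr.2 ≠ 0 then acc ++ [(pr.1.1, pr.1.2, pr.2)] else acc) [])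
      (fun x => x.1) (fun x => x.2.1)
    = PySem.List.sorted (pvX a b) (fun t => toLex (t.1, t.2.1)) := by
  rw [pv_sorted2_eq_sorted]
  have h1 : ((pvDedupNZ a).items.foldl (fun C p =>
      if (pvBByRow b).contains p.1.2 then
        ((pvBByRow b).getD p.1.2 PySem.Dict.empty).items.foldl
          (fun C q => C.insert (p.1.1, q.1) (C.getD (p.1.1, q.1) 0 + p.2 * q.2)) C
      else C) PySem.Dict.empty) = pvCdict a b := by
    rw [pv_C_eq_fold]; rfl
  rw [h1]
  congr 1
  rw [pv_foldl_append_if (fun pr : (Int × Int) × Int => pr.2 ≠ 0) (fun pr => (pr.1.1, pr.1.2, pr.2))]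
  rw [PySem.Dict.items_eq_map_keys (pvCdict a b) (pv_Cdict_nodup a b) 0]
  rw [List.filter_map, List.map_map]
  rw [pv_Cdict_keys]
  unfold pvX
  rw [List.filter_congr (by
    intro k _
    simp [pv_Cdict_getD] : ∀ x ∈ pvK a b,
      ((fun pr : (Int × Int) × Int => decide (pr.2 ≠ 0)) ∘ fun k => (k, (pvCdict a b).getD k 0)) x
        = (fun k => decide (pvS a b k ≠ 0)) x)]
  apply List.map_congr_left
  intro k _
  simp [pv_Cdict_getD]

-- B-side: the row/column indexes, seen through getD
theorem pv_Arows_getD (a : List (Int × Int × Int)) (r : Int) :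
    ((pvDedupNZ a).items.foldl
        (fun d p => d.modify p.1.1 [] (fun xs => xs ++ [(p.1.2, p.2)])) PySem.Dict.empty).getD r []
      = ((pvDedupNZ a).items.filter (fun p => p.1.1 == r)).map (fun p => (p.1.2, p.2)) := by
  rw [← List.foldl_map (f := fun p : (Int × Int) × Int => (p.1.1, (p.1.2, p.2)))
      (g := fun (d : PySem.Dict Int (List (Int × Int))) (p : Int × (Int × Int)) =>
        d.modify p.1 [] (fun xs => xs ++ [p.2]))]
  rw [PySem.Dict.getD_foldl_modify_append]
  rw [List.filter_map, List.map_map]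
  rfl

theorem pv_Bcols_getD (b : List (Int × Int × Int)) (k : Int) :
    ((pvDedupNZ b).items.foldl
        (fun d p => d.modify p.1.1 [] (fun xs => xs ++ [p.1.2])) PySem.Dict.empty).getD k []
      = ((pvDedupNZ b).items.filter (fun p => p.1.1 == k)).map (fun p => p.1.2) := by
  rw [← List.foldl_map (f := fun p : (Int × Int) × Int => (p.1.1, p.1.2))
      (g := fun (d : PySem.Dict Int (List Int)) (p : Int × Int) =>
        d.modify p.1 [] (fun xs => xs ++ [p.2]))]
  rw [PySem.Dict.getD_foldl_modify_append]
  rw [List.filter_map, List.map_map]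
  rfl

-- the candidate-cell list B builds is exactly the projection of the contribution list
theorem pv_cells_list (a b : List (Int × Int × Int)) :
    (pvDedupNZ a).keys.flatMap (fun rk =>
      (((pvDedupNZ b).items.foldl
          (fun d p => d.modify p.1.1 [] (fun xs => xs ++ [p.1.2])) PySem.Dict.empty).getD rk.2 []).map
        (fun c => (rk.1, c)))
      = (pvContrib a b).map (fun t => (t.1, t.2.1)) := by
  unfold pvContrib
  rw [List.map_flatMap]
  simp only [PySem.Dict.keys]
  rw [List.flatMap_map]
  apply List.flatMap_congr
  intro p _
  rw [pv_Bcols_getD, pv_rows_items, List.map_map, List.map_map]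
  simp only [List.map_map]
  rfl

-- the inner sum of one A-entry's contributions at a fixed cell
theorem pv_inner_sum (b : List (Int × Int × Int)) (p : (Int × Int) × Int) (rc : Int × Int) :
    (((((pvBByRow b).getD p.1.2 PySem.Dict.empty).items.map
          (fun s => (p.1.1, s.1, p.2 * s.2))).filter (fun t => (t.1, t.2.1) == rc)).map
        (fun t => t.2.2)).sum
      = if p.1.1 == rc.1 then p.2 * (pvDedupNZ b).getD (p.1.2, rc.2) 0 else 0 := by
  rw [List.filter_map, List.map_map]
  by_cases hr : p.1.1 = rc.1
  · rw [if_pos (by simp [hr])]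
    rw [List.filter_congr (by
      intro s _
      simp [Function.comp, Prod.ext_iff, hr] : ∀ s ∈ ((pvBByRow b).getD p.1.2 PySem.Dict.empty).items,
        ((fun t : Int × Int × Int => (t.1, t.2.1) == rc) ∘ fun s => (p.1.1, s.1, p.2 * s.2)) s
          = (fun s : Int × Int => s.1 == rc.2) s)]
    rw [pv_rows_items, List.filter_map, List.map_map, List.filter_filter]
    rw [List.filter_congr (by
      intro x _
      rw [Bool.eq_iff_iff]
      simp only [Function.comp_apply, Bool.and_eq_true, beq_iff_eq, Prod.ext_iff]
      tauto :
        ∀ x ∈ (pvDedupNZ b).items,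
          (((fun s : Int × Int => s.1 == rc.2) ∘ fun q : (Int × Int) × Int => (q.1.2, q.2)) x
              && (x.1.1 == p.1.2))
            = (fun x : (Int × Int) × Int => x.1 == (p.1.2, rc.2)) x)]
    rw [← pv_sum_filter_getD (pvDedupNZ b) (pv_nodup_keys_dedup b) (p.1.2, rc.2),
      ← List.sum_map_mul_left]
    rfl
  · rw [if_neg (by simp [hr])]
    rw [List.filter_eq_nil_iff.mpr (by
      intro s _
      simp [Function.comp, Prod.ext_iff, hr])]
    simp

-- per-cell value: B's dot product equals the accumulated sum
theorem pv_V_eq_S (a b : List (Int × Int × Int)) (rc : Int × Int) :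
    ((((pvDedupNZ a).items.foldl
          (fun d p => d.modify p.1.1 [] (fun xs => xs ++ [(p.1.2, p.2)])) PySem.Dict.empty).getD rc.1 []).map
        (fun kv => kv.2 * (pvDedupNZ b).getD (kv.1, rc.2) 0)).sum
      = pvS a b rc := by
  rw [pv_Arows_getD, List.map_map]
  unfold pvS pvContrib
  induction (pvDedupNZ a).items with
  | nil => simp
  | cons p l ih =>
    rw [List.flatMap_cons, List.filter_append, List.map_append, List.sum_append, ← ih,
      List.filter_cons, pv_inner_sum]
    by_cases hr : p.1.1 = rc.1
    · rw [if_pos (by simpa using hr), if_pos (by simpa using hr)]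
      simp only [List.map_cons, List.sum_cons]
      rfl
    · rw [if_neg (by simpa using hr), if_neg (by simpa using hr)]
      simp

-- the per-cell emission loop is filter + map
theorem pv_fold_cells (V : Int × Int → Int) (l : List (Int × Int)) :
    l.foldl (fun res rc => if V rc ≠ 0 then res ++ [(rc.1, rc.2, V rc)] else res) []
      = (l.filter (fun rc => decide (V rc ≠ 0))).map (fun rc => (rc.1, rc.2, V rc)) :=
  pv_foldl_append_if (fun rc => V rc ≠ 0) (fun rc => (rc.1, rc.2, V rc)) l []

-- B's body computes the filtered map over the sorted key set
theorem pvB_body (a b : List (Int × Int × Int)) :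
    (PySem.List.sorted2
        (PySem.Set.ofList ((pvDedupNZ a).keys.flatMap (fun rk =>
          (((pvDedupNZ b).items.foldl
              (fun d p => d.modify p.1.1 [] (fun xs => xs ++ [p.1.2])) PySem.Dict.empty).getD rk.2 []).map
            (fun c => (rk.1, c)))))
        (fun x => x.1) (fun x => x.2)).foldl
      (fun res rc =>
        if ((((pvDedupNZ a).items.foldl
            (fun d p => d.modify p.1.1 [] (fun xs => xs ++ [(p.1.2, p.2)])) PySem.Dict.empty).getD rc.1 []).map
          (fun kv => kv.2 * (pvDedupNZ b).getD (kv.1, rc.2) 0)).sum ≠ 0 then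
          res ++ [(rc.1, rc.2, ((((pvDedupNZ a).items.foldl
            (fun d p => d.modify p.1.1 [] (fun xs => xs ++ [(p.1.2, p.2)])) PySem.Dict.empty).getD rc.1 []).map
          (fun kv => kv.2 * (pvDedupNZ b).getD (kv.1, rc.2) 0)).sum)]
        else res) []
    = ((PySem.List.sorted (pvK a b) (fun k => toLex (k.1, k.2))).filter
        (fun k => decide (pvS a b k ≠ 0))).map (fun k => (k.1, k.2, pvS a b k)) := by
  rw [pv_cells_list, pv_sorted2_eq_sorted]
  have hK : PySem.Set.ofList ((pvContrib a b).map (fun t => (t.1, t.2.1))) = pvK a b := rfl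
  rw [hK]
  refine Eq.trans (pv_fold_cells (fun rc => ((((pvDedupNZ a).items.foldl
      (fun d p => d.modify p.1.1 [] (fun xs => xs ++ [(p.1.2, p.2)])) PySem.Dict.empty).getD rc.1 []).map
    (fun kv => kv.2 * (pvDedupNZ b).getD (kv.1, rc.2) 0)).sum)
    (PySem.List.sorted (pvK a b) (fun k => toLex (k.1, k.2)))) ?_
  have hfix : ∀ rc : Int × Int, ((((pvDedupNZ a).items.foldl
      (fun d p => d.modify p.1.1 [] (fun xs => xs ++ [(p.1.2, p.2)])) PySem.Dict.empty).getD rc.1 []).map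
    (fun kv => kv.2 * (pvDedupNZ b).getD (kv.1, rc.2) 0)).sum = pvS a b rc := pv_V_eq_S a b
  simp only [hfix]

-- the two presentations of the sorted result coincide
theorem pv_final (a b : List (Int × Int × Int)) :
    PySem.List.sorted (pvX a b) (fun t => toLex (t.1, t.2.1))
      = ((PySem.List.sorted (pvK a b) (fun k => toLex (k.1, k.2))).filter
          (fun k => decide (pvS a b k ≠ 0))).map (fun k => (k.1, k.2, pvS a b k)) := by
  apply PySem.List.sorted_eq_of_perm_of_pairwise_lt
  · exact ((PySem.List.sorted_perm (pvK a b) (fun k => toLex (k.1, k.2)) false).filter _).map _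
  · rw [List.pairwise_map]
    apply List.Pairwise.filter
    have hp := PySem.List.sorted_pairwise (pvK a b) (fun k => toLex (k.1, k.2))
    have hnd : (PySem.List.sorted (pvK a b) (fun k => toLex (k.1, k.2))).Nodup :=
      (PySem.List.sorted_perm (pvK a b) (fun k => toLex (k.1, k.2)) false).nodup_iff.mpr
        (PySem.Set.nodup_ofList _)
    refine (hp.and hnd).imp ?_
    intro x y h
    exact lt_of_le_of_ne h.1 (fun he => h.2 (by
      have := toLex.injective he
      have hx : (x.1, x.2) = (y.1, y.2) := this
      calc x = (x.1, x.2) := Prod.mk.eta.symm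
        _ = (y.1, y.2) := hx
        _ = y := Prod.mk.eta))

-- ===== VERDICT (by name: the statement is the Claim_ definition above) =====
theorem sparse_matrix_multiply_spec : Claim_equal_sparse_matrix_multiply := by
  intro a ad b bd _ hpre
  unfold Spec_sparse_matrix_multiply
  unfold Pre_sparse_matrix_multiply at hpre
  have h : ¬ (ad.2 ≠ bd.1) := by simpa using hpre
  unfold sparse_matrix_multiply sparse_matrix_multiply_alt
  rw [if_neg h, if_neg h]
  exact (pvA_body a b).trans ((pv_final a b).trans (pvB_body a b).symm)
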